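-- pv_equiv track=rewrite | github.com/poonYeongShian/N_QueenOmniChanRook_with_hill_climbing | Poon-30696003-2ndSem2022FIT3080.py | rook_pattern_atk
-- ===== SOURCE A (Python) =====
-- def rook_pattern_atk(N, brd, col, row):
--     """This method calculate the number of chess that the current chess is attacking
--     vertically in its current position"""
--
--     attacking = 0
--
--     # down
--     for down in range(row + 1, N):
--         if brd[down][col][0] == 1:
--             attacking += 1
--             break
--     # up
--     for up in range(row - 1, -1, -1):
--         if brd[up][col][0] == 1:
--             attacking += 1
--             break
--
--     return attacking
-- ===== SOURCE B (Python) =====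
-- def rook_pattern_atk(N, brd, col, row):
--     """Single full pass over all rows with two boolean flags instead of two
--     directional early-exit scans; a blocker strictly below/above the row sets
--     the corresponding flag, and the answer is the number of flags set."""
--     has_above = False
--     has_below = False
--     for r in range(N):
--         if r != row and brd[r][col][0] == 1:
--             if r > row:
--                 has_below = True
--             else:
--                 has_above = True
--     return int(has_above) + int(has_below)
-- ===== Notes on version B (the rewrite author's own statement) =====
-- stated objective: alternative
-- what changed: Replaces A's two directional early-exit scans (range(row+1,N) with break, range(row-1,-1,-1) with break) by one full pass over range(N) maintaining two boolean flags set on any blocker strictly below/above the row; returns the number of flags set.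
-- outside the precondition, e.g. on rook_pattern_atk(3, [[[0]], [[1]]], 0, 0): A returns 1, B raises IndexError; on rook_pattern_atk(1, [[[0]], [[1]]], 0, 2): A returns 1, B returns 0
import Mathlib
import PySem

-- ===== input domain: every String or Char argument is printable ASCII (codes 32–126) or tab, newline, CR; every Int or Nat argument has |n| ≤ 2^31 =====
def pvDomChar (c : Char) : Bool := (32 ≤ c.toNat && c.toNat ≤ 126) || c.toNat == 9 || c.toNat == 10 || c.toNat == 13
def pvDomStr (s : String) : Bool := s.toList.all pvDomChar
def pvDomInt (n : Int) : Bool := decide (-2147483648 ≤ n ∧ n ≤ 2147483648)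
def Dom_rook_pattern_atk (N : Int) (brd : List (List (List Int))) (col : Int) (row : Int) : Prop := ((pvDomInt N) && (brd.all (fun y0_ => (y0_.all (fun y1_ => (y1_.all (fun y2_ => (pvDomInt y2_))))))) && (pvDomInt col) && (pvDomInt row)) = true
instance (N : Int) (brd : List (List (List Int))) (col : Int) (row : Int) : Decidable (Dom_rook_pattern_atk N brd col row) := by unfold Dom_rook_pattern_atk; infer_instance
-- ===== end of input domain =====

-- B replaces A's two directional early-exit scans by one full pass over range(N) maintaining
-- two boolean flags (blocker strictly above / strictly below); same O(N) cost, different traversal.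
-- ===== PORT A =====
-- one of A's directional loops: scan the index list, return 1 at the first blocker (break), else 0
-- (pyGetD: Python indexing incl. negative indices; where the Python raises, Pre_ excludes the input)
def pvAtkScan (brd : List (List (List Int))) (col : Int) : List Int → Int
  | [] => 0
  | r :: rest =>
    if PySem.List.pyGetD (PySem.List.pyGetD (PySem.List.pyGetD brd r []) col []) 0 0 = 1 then 1
    else pvAtkScan brd col rest

def rook_pattern_atk (N : Int) (brd : List (List (List Int))) (col : Int) (row : Int) : Int :=
  pvAtkScan brd col (PySem.List.pyRange (row + 1) N 1)
    + pvAtkScan brd col (PySem.List.pyRange (row - 1) (-1) (-1))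

-- ===== PORT B =====
-- single pass: fold over range(N) carrying the pair of flags (has_above, has_below)
def rook_pattern_atk_alt (N : Int) (brd : List (List (List Int))) (col : Int) (row : Int) : Int :=
  let flags := (PySem.List.pyRange 0 N 1).foldl
    (fun (s : Bool × Bool) r =>
      if r ≠ row ∧ PySem.List.pyGetD (PySem.List.pyGetD (PySem.List.pyGetD brd r []) col []) 0 0 = 1 then
        if row < r then (s.1, true) else (true, s.2)
      else s)
    (false, false)
  (if flags.1 then (1 : Int) else 0) + (if flags.2 then (1 : Int) else 0)

-- ===== PRECONDITION & SPEC =====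
-- pvGood: the access brd[r][col][0] succeeds (Python indexing, incl. negative indices)
def pvGood (brd : List (List (List Int))) (col r : Int) : Bool :=
  decide (PySem.Raise.InRange brd.length r) &&
  decide (PySem.Raise.InRange (PySem.List.pyGetD brd r []).length col) &&
  decide (PySem.List.pyGetD (PySem.List.pyGetD brd r []) col [] ≠ [])

-- pvHitB: the blocker test brd[r][col][0] == 1 (via Python indexing)
def pvHitB (brd : List (List (List Int))) (col r : Int) : Bool :=
  decide (PySem.List.pyGetD (PySem.List.pyGetD (PySem.List.pyGetD brd r []) col []) 0 0 = 1)

-- Pre_: the natural domain — every cell brd[r][col][0] for r in range(N) is addressable and the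
-- rows A scans outside range(N) (row out of [-1, N], or negative-index wraparound) are addressable
-- and blocker-free, or all scanned ranges are empty.  This excludes inputs on which A returns a
-- value determined by rows outside range(N) that B never visits, or where A's early exit skips a
-- bad index on which B's full pass raises; see the cites in claim.json.
def Pre_rook_pattern_atk (N : Int) (brd : List (List (List Int))) (col : Int) (row : Int) : Prop :=
  (-1 ≤ row ∧ 0 ≤ N ∧ N ≤ (brd.length : Int) ∧
    (∀ r ∈ PySem.List.pyRange 0 (min N (brd.length : Int)) 1, pvGood brd col r = true) ∧
    (row ≤ N ∨ (row ≤ (brd.length : Int) ∧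
      ∀ r ∈ PySem.List.pyRange N row 1, pvGood brd col r = true ∧ pvHitB brd col r = false))) ∨
  (N ≤ 0 ∧ N - 1 ≤ row ∧ row ≤ 0) ∨
  (N ≤ 0 ∧ 0 ≤ row ∧ row ≤ (brd.length : Int) ∧
    ∀ r ∈ PySem.List.pyRange 0 row 1, pvGood brd col r = true ∧ pvHitB brd col r = false) ∨
  (row ≤ -1 ∧ 0 ≤ N ∧ N ≤ (brd.length : Int) ∧ -(brd.length : Int) ≤ row + 1 ∧
    (∀ r ∈ PySem.List.pyRange 0 (min N (brd.length : Int)) 1, pvGood brd col r = true) ∧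
    ∀ r ∈ PySem.List.pyRange (row + 1) 0 1, pvGood brd col r = true ∧ pvHitB brd col r = false)
instance (N : Int) (brd : List (List (List Int))) (col : Int) (row : Int) : Decidable (Pre_rook_pattern_atk N brd col row) := by unfold Pre_rook_pattern_atk; infer_instance

def pvWitness_rook_pattern_atk : Int × List (List (List Int)) × Int × Int := (2, [[[1]], [[0]]], 0, 0)

def Spec_rook_pattern_atk (N : Int) (brd : List (List (List Int))) (col : Int) (row : Int) (out : Int) : Prop := out = rook_pattern_atk_alt N brd col row
instance (N : Int) (brd : List (List (List Int))) (col : Int) (row : Int) (out : Int) : Decidable (Spec_rook_pattern_atk N brd col row out) := by unfold Spec_rook_pattern_atk; infer_instance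

-- ===== CLAIM =====
def Claim_equal_rook_pattern_atk : Prop := ∀ (N : Int) (brd : List (List (List Int))) (col : Int) (row : Int), Dom_rook_pattern_atk N brd col row → Pre_rook_pattern_atk N brd col row → Spec_rook_pattern_atk N brd col row (rook_pattern_atk N brd col row)

-- ===== LEMMAS AND PROOFS =====
theorem pvAtkScan_eq_any (brd : List (List (List Int))) (col : Int) (l : List Int) :
    pvAtkScan brd col l = if l.any (pvHitB brd col) then 1 else 0 := by
  induction l with
  | nil => simp [pvAtkScan]
  | cons r rest ih =>
    by_cases h : PySem.List.pyGetD (PySem.List.pyGetD (PySem.List.pyGetD brd r []) col []) 0 0 = 1 <;>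
      simp [pvAtkScan, pvHitB, h, ih]

-- the flag-fold of B computes the two "any" predicates
theorem pvFold_flags (brd : List (List (List Int))) (col row : Int) (l : List Int) (a b : Bool) :
    l.foldl
      (fun (s : Bool × Bool) r =>
        if r ≠ row ∧ PySem.List.pyGetD (PySem.List.pyGetD (PySem.List.pyGetD brd r []) col []) 0 0 = 1 then
          if row < r then (s.1, true) else (true, s.2)
        else s)
      (a, b)
    = (a || l.any (fun r => (decide (r ≠ row) && pvHitB brd col r) && !decide (row < r)),
       b || l.any (fun r => (decide (r ≠ row) && pvHitB brd col r) && decide (row < r))) := by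
  induction l generalizing a b with
  | nil => simp
  | cons r rest ih =>
    by_cases h : r ≠ row ∧ PySem.List.pyGetD (PySem.List.pyGetD (PySem.List.pyGetD brd r []) col []) 0 0 = 1
    · by_cases hr : row < r <;> simp [h, hr, pvHitB, ih]
    · by_cases he : r = row
      · simp [he, ih]
      · have hh : ¬ PySem.List.pyGetD (PySem.List.pyGetD (PySem.List.pyGetD brd r []) col []) 0 0 = 1 :=
          fun hx => h ⟨he, hx⟩
        simp [he, hh, pvHitB, ih]

-- any over A's countdown up-range equals any over [0, row)
theorem pvUpRev (row : Int) (p : Int → Bool) :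
    (PySem.List.pyRange (row - 1) (-1) (-1)).any p = (PySem.List.pyRange 0 row 1).any p := by
  rw [PySem.List.pyRange_neg_one_eq_reverse, List.any_reverse]
  norm_num

-- a range on which every element fails the blocker test contributes false to any
theorem pvAnyFalse (brd : List (List (List Int))) (col : Int) (l : List Int)
    (h : ∀ r ∈ l, pvHitB brd col r = false) : l.any (pvHitB brd col) = false := by
  simp only [List.any_eq_false, Bool.not_eq_true]
  exact h

-- ===== VERDICT =====
theorem rook_pattern_atk_spec : Claim_equal_rook_pattern_atk := by
  intro N brd col row _hdom hpre
  show rook_pattern_atk N brd col row = rook_pattern_atk_alt N brd col row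
  unfold rook_pattern_atk rook_pattern_atk_alt
  rw [pvAtkScan_eq_any, pvAtkScan_eq_any, pvFold_flags, pvUpRev]
  simp only [Bool.false_or]
  rcases hpre with ⟨hrow0, hN0, hNL, _, hrest⟩ | ⟨hN, hr1, hr2⟩ | ⟨hN, hr0, hrL, hseg⟩ |
      ⟨hrneg, hN0, hNL, hwrap, _, hseg⟩
  -- D1: -1 ≤ row, 0 ≤ N ≤ len, accesses good on [0,N)
  case inl =>
    by_cases hrowN : row ≤ N
    -- row ≤ N: both directional anys match the flag anys over [0,N)
    · have hdown : (PySem.List.pyRange (row + 1) N 1).any (pvHitB brd col)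
          = (PySem.List.pyRange 0 N 1).any (fun r => (decide (r ≠ row) && pvHitB brd col r) && decide (row < r)) := by
        rw [Bool.eq_iff_iff]
        simp only [List.any_eq_true, PySem.List.mem_pyRange_one, Bool.and_eq_true, decide_eq_true_eq]
        constructor
        · rintro ⟨x, ⟨h1, h2⟩, hh⟩; exact ⟨x, ⟨by omega, h2⟩, ⟨⟨by omega, hh⟩, by omega⟩⟩
        · rintro ⟨x, ⟨h1, h2⟩, ⟨⟨_, hh⟩, h3⟩⟩; exact ⟨x, ⟨by omega, h2⟩, hh⟩
      have hup : (PySem.List.pyRange 0 row 1).any (pvHitB brd col)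
          = (PySem.List.pyRange 0 N 1).any (fun r => (decide (r ≠ row) && pvHitB brd col r) && !decide (row < r)) := by
        rw [Bool.eq_iff_iff]
        simp only [List.any_eq_true, PySem.List.mem_pyRange_one, Bool.and_eq_true,
          Bool.not_eq_eq_eq_not, Bool.not_true, decide_eq_true_eq, decide_eq_false_iff_not]
        constructor
        · rintro ⟨x, ⟨h1, h2⟩, hh⟩; exact ⟨x, ⟨by omega, by omega⟩, ⟨⟨by omega, hh⟩, by omega⟩⟩
        · rintro ⟨x, ⟨h1, h2⟩, ⟨⟨hne, hh⟩, h3⟩⟩; exact ⟨x, ⟨by omega, by omega⟩, hh⟩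
      rw [hdown, hup]
      exact add_comm _ _
    -- N < row ≤ len, rows [N, row) good and blocker-free: the up-scan reduces to [0, N)
    · obtain ⟨hrowL, hseg⟩ : row ≤ (brd.length : Int) ∧
          ∀ r ∈ PySem.List.pyRange N row 1, pvGood brd col r = true ∧ pvHitB brd col r = false := by
        rcases hrest with h | h
        · omega
        · exact h
      have hsplit : PySem.List.pyRange 0 row 1
          = PySem.List.pyRange 0 N 1 ++ PySem.List.pyRange N row 1 :=
        PySem.List.pyRange_one_append 0 N row (by omega) (by omega)
      have hdown : PySem.List.pyRange (row + 1) N 1 = [] :=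
        PySem.List.pyRange_one_eq_nil (by omega)
      have hup : (PySem.List.pyRange 0 row 1).any (pvHitB brd col)
          = (PySem.List.pyRange 0 N 1).any (pvHitB brd col) := by
        rw [hsplit, List.any_append, pvAnyFalse brd col _ (fun r hr => (hseg r hr).2), Bool.or_false]
      have habove : (PySem.List.pyRange 0 N 1).any (pvHitB brd col)
          = (PySem.List.pyRange 0 N 1).any (fun r => (decide (r ≠ row) && pvHitB brd col r) && !decide (row < r)) := by
        rw [Bool.eq_iff_iff]
        simp only [List.any_eq_true, PySem.List.mem_pyRange_one, Bool.and_eq_true,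
          Bool.not_eq_eq_eq_not, Bool.not_true, decide_eq_true_eq, decide_eq_false_iff_not]
        constructor
        · rintro ⟨x, ⟨h1, h2⟩, hh⟩; exact ⟨x, ⟨h1, h2⟩, ⟨⟨by omega, hh⟩, by omega⟩⟩
        · rintro ⟨x, ⟨h1, h2⟩, ⟨⟨hne, hh⟩, h3⟩⟩; exact ⟨x, ⟨h1, h2⟩, hh⟩
      have hbelow : (PySem.List.pyRange 0 N 1).any
          (fun r => (decide (r ≠ row) && pvHitB brd col r) && decide (row < r)) = false := by
        simp only [List.any_eq_false, PySem.List.mem_pyRange_one]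
        intro x hx
        have hlt : decide (row < x) = false := by simp only [decide_eq_false_iff_not]; omega
        simp [hlt]
      rw [hdown, hup, habove, hbelow]
      simp
  -- D2: every scanned range is empty, both sides are 0
  case inr.inl =>
    rw [PySem.List.pyRange_one_eq_nil (show N ≤ row + 1 by omega),
      PySem.List.pyRange_one_eq_nil (show row ≤ 0 from hr2),
      PySem.List.pyRange_one_eq_nil (show N ≤ 0 from hN)]
    simp
  -- D3: N ≤ 0 ≤ row, rows [0, row) good and blocker-free: both sides are 0
  case inr.inr.inl =>
    rw [PySem.List.pyRange_one_eq_nil (show N ≤ row + 1 by omega),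
      PySem.List.pyRange_one_eq_nil (show N ≤ 0 from hN),
      pvAnyFalse brd col _ (fun r hr => (hseg r hr).2)]
    simp
  -- D4: row ≤ -1, wrapped rows [row+1, 0) good and blocker-free: the down-scan reduces to [0, N)
  case inr.inr.inr =>
    have hup : PySem.List.pyRange 0 row 1 = [] := PySem.List.pyRange_one_eq_nil (by omega)
    have hsplit : PySem.List.pyRange (row + 1) N 1
        = PySem.List.pyRange (row + 1) 0 1 ++ PySem.List.pyRange 0 N 1 :=
      PySem.List.pyRange_one_append (row + 1) 0 N (by omega) (by omega)
    have hdown : (PySem.List.pyRange (row + 1) N 1).any (pvHitB brd col)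
        = (PySem.List.pyRange 0 N 1).any (pvHitB brd col) := by
      rw [hsplit, List.any_append, pvAnyFalse brd col _ (fun r hr => (hseg r hr).2), Bool.false_or]
    have hbelow : (PySem.List.pyRange 0 N 1).any (pvHitB brd col)
        = (PySem.List.pyRange 0 N 1).any (fun r => (decide (r ≠ row) && pvHitB brd col r) && decide (row < r)) := by
      rw [Bool.eq_iff_iff]
      simp only [List.any_eq_true, PySem.List.mem_pyRange_one, Bool.and_eq_true, decide_eq_true_eq]
      constructor
      · rintro ⟨x, ⟨h1, h2⟩, hh⟩; exact ⟨x, ⟨h1, h2⟩, ⟨⟨by omega, hh⟩, by omega⟩⟩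
      · rintro ⟨x, ⟨h1, h2⟩, ⟨⟨hne, hh⟩, h3⟩⟩; exact ⟨x, ⟨h1, h2⟩, hh⟩
    have habove : (PySem.List.pyRange 0 N 1).any
        (fun r => (decide (r ≠ row) && pvHitB brd col r) && !decide (row < r)) = false := by
      simp only [List.any_eq_false, PySem.List.mem_pyRange_one]
      intro x hx
      have hlt : decide (row < x) = true := by simp only [decide_eq_true_eq]; omega
      simp [hlt]
    rw [hup, hdown, hbelow, habove]
    simp
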